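-- pv_equiv track=rewrite | github.com/h2222/projects | bert4rec/gen_data_fin.py | create_masked_lm_predictions_force_last
-- ===== SOURCE A (Python) =====
-- def create_masked_lm_predictions_force_last(tokens): # item list [12, 32, 55, 63, ..]
--     """
--     为 Training instance 对象提供必要的参数
--     包括: tokens 序列(ids 序列),  掩盖位置([ids]), 掩盖的label([label])
--     """
--     last_index = -1
--     # 最后一个token(预测位置)的index定位
--     for (i, toke) in enumerate(tokens):
--         if tokens == '[CLS]' or tokens == '[PAD]' or tokens == '[NO_USE]':
--             continue
--         last_index = i
--
--     assert last_index > 0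
--
--     # 保证 tokens 为list, 并在最后位置变为 [MASK]
--     output_tokens = list(tokens)
--     output_tokens[last_index] = '[MASK]'
--
--     masked_lm_positions = [last_index]
--     masked_lm_labels  = [tokens[last_index]]  # 没变[MASK]之前, 最后一个的tokens
--
--     return (output_tokens, masked_lm_positions, masked_lm_labels)
-- ===== SOURCE B (Python) =====
-- def create_masked_lm_predictions_force_last(tokens):
--     # The loop's condition compares the whole list to a string (always False),
--     # so the loop just leaves last_index at the final index: use the closed form.
--     last_index = len(tokens) - 1
--     assert last_index > 0
--     output_tokens = list(tokens)
--     output_tokens[last_index] = '[MASK]'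
--     return (output_tokens, [last_index], [tokens[last_index]])
-- ===== Notes on version B (the rewrite author's own statement) =====
-- stated objective: simpler
-- what changed: Replaces A's enumerate loop (whose list-vs-string comparison can never trigger the continue) with the closed form last_index = len(tokens) - 1.
import Mathlib
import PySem

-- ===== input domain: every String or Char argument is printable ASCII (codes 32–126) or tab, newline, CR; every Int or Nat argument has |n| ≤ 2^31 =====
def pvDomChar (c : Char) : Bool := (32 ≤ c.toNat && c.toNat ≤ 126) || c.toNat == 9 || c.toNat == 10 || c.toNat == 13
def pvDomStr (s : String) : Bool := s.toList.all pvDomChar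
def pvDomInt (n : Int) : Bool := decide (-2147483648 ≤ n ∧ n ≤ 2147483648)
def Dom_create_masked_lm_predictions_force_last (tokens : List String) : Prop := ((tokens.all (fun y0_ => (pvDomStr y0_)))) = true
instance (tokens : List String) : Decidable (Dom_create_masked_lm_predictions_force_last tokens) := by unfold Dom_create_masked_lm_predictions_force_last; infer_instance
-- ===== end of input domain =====

-- ===== PORT A =====
-- Port of A. One honest line: B replaces A's enumerate loop with the closed form
-- last_index = len(tokens) - 1, since the loop's list-vs-string comparison never fires (simpler).
-- In Python `tokens == '[CLS]'` compares the LIST with a string: always False; ported exactly.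
def pyListEqStr (_tokens : List String) (_s : String) : Bool := false

def create_masked_lm_predictions_force_last (tokens : List String) : List String × List Int × List String :=
  let last_index : Int :=
    (PySem.List.enumerate tokens 0).foldl
      (fun li p =>
        if pyListEqStr tokens "[CLS]" || pyListEqStr tokens "[PAD]" || pyListEqStr tokens "[NO_USE]" then
          li
        else p.1) (-1)
  -- assert last_index > 0 : inputs where this fails are excluded by Pre_ (length ≤ 1)
  let output_tokens := PySem.List.pySetD tokens last_index "[MASK]"
  let masked_lm_positions := [last_index]
  let masked_lm_labels := [PySem.List.pyGetD tokens last_index ""]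
  (output_tokens, masked_lm_positions, masked_lm_labels)

-- ===== PORT B =====
def create_masked_lm_predictions_force_last_alt (tokens : List String) : List String × List Int × List String :=
  let last_index : Int := (tokens.length : Int) - 1
  -- assert last_index > 0 : excluded by Pre_
  let output_tokens := PySem.List.pySetD tokens last_index "[MASK]"
  (output_tokens, [last_index], [PySem.List.pyGetD tokens last_index ""])

-- ===== PRECONDITION & SPEC =====
-- A (and B) raise AssertionError when last_index ≤ 0, i.e. on lists of length 0 or 1.
def Pre_create_masked_lm_predictions_force_last (tokens : List String) : Prop := 2 ≤ tokens.length
instance (tokens : List String) : Decidable (Pre_create_masked_lm_predictions_force_last tokens) := by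
  unfold Pre_create_masked_lm_predictions_force_last; infer_instance
def pvWitness_create_masked_lm_predictions_force_last : List String := ["a", "b", "c"]

def Spec_create_masked_lm_predictions_force_last (tokens : List String) (out : List String × List Int × List String) : Prop := out = create_masked_lm_predictions_force_last_alt tokens
instance (tokens : List String) (out : List String × List Int × List String) : Decidable (Spec_create_masked_lm_predictions_force_last tokens out) := by unfold Spec_create_masked_lm_predictions_force_last; infer_instance

-- ===== CLAIM =====
def Claim_equal_create_masked_lm_predictions_force_last : Prop := ∀ (tokens : List String), Dom_create_masked_lm_predictions_force_last tokens → Pre_create_masked_lm_predictions_force_last tokens → Spec_create_masked_lm_predictions_force_last tokens (create_masked_lm_predictions_force_last tokens)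

-- ===== LEMMAS AND PROOFS =====
-- The loop keeps only the index of the last enumerated element.
theorem foldl_last_fst (tokens : List String) (s init : Int) :
    (PySem.List.enumerate tokens s).foldl (fun (_ : Int) (p : Int × String) => p.1) init
      = if tokens = [] then init else s + tokens.length - 1 := by
  induction tokens generalizing s init with
  | nil => simp [PySem.List.enumerate_nil]
  | cons x xs ih =>
    rw [PySem.List.enumerate_cons]
    simp only [List.foldl_cons, ih]
    cases xs with
    | nil => simp
    | cons y ys => simp only [List.length_cons]; push_cast; ring_nf

-- ===== VERDICT =====
theorem create_masked_lm_predictions_force_last_spec : Claim_equal_create_masked_lm_predictions_force_last := by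
  intro tokens _ hpre
  unfold Spec_create_masked_lm_predictions_force_last
  unfold create_masked_lm_predictions_force_last create_masked_lm_predictions_force_last_alt
  have hne : tokens ≠ [] := by
    intro h; subst h; simp [Pre_create_masked_lm_predictions_force_last] at hpre
  simp only [pyListEqStr, Bool.or_self, Bool.false_eq_true, if_false, foldl_last_fst tokens 0 (-1),
    hne, if_false, zero_add]
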